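-- pv_equiv track=rewrite | github.com/9382/python-wikibot | main.py | GetNamespace
-- ===== SOURCE A (Python) =====
-- namespaces = ["User","Wikipedia","WP","File","MediaWiki","Template","Help","Category","Portal","Draft","TimedText","Module"] #Gadget( definition) is deprecated
--
-- pseudoNamespaces = {"CAT":"Category","H":"Help","MOS":"Wikipedia","WP":"Wikipedia","WT":"Wikipedia talk",
--                     "Project":"Wikipedia","Project_talk":"Wikipedia talk","Image":"File","Image_talk":"File talk",
--                     "WikiProject":"Wikipedia","T":"Template","MP":"Article","P":"Portal","MoS":"Wikipedia"}
--
-- def GetNamespace(articlename):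
--     for namespace in namespaces:
--         if articlename.startswith(namespace+":"):
--             return namespace
--         if articlename.startswith(namespace+"_talk:"):
--             return namespace+" talk"
--     prefix = articlename.split(":")[0]
--     if prefix in pseudoNamespaces:
--         return pseudoNamespaces[prefix]
--     if articlename.startswith("Talk:"):
--         return "Talk"
--     if articlename.startswith("Special:"):
--         return "Special"
--     return "Article"
-- ===== SOURCE B (Python) =====
-- namespaces = ["User","Wikipedia","WP","File","MediaWiki","Template","Help","Category","Portal","Draft","TimedText","Module"]
--
-- pseudoNamespaces = {"CAT":"Category","H":"Help","MOS":"Wikipedia","WP":"Wikipedia","WT":"Wikipedia talk",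
--                     "Project":"Wikipedia","Project_talk":"Wikipedia talk","Image":"File","Image_talk":"File talk",
--                     "WikiProject":"Wikipedia","T":"Template","MP":"Article","P":"Portal","MoS":"Wikipedia"}
--
-- # Precomputed dispatch tables: every decision of the task depends only on the text before the
-- # first ":" and on whether a ":" exists, so we merge all the rules once (with the original
-- # precedence, via setdefault) into one table per case and answer with a single lookup.
-- def _build_tables():
--     colon = {}
--     for ns in namespaces:
--         colon[ns] = ns
--         colon[ns + "_talk"] = ns + " talk"
--     for k, v in pseudoNamespaces.items():
--         colon.setdefault(k, v)
--     colon.setdefault("Talk", "Talk")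
--     colon.setdefault("Special", "Special")
--     nocolon = dict(pseudoNamespaces)
--     return colon, nocolon
--
-- _COLON_TABLE, _NOCOLON_TABLE = _build_tables()
--
-- def GetNamespace(articlename):
--     prefix, sep, _rest = articlename.partition(":")
--     table = _COLON_TABLE if sep else _NOCOLON_TABLE
--     return table.get(prefix, "Article")
-- ===== Notes on version B (the rewrite author's own statement) =====
-- stated objective: alternative
-- what changed: B precomputes (once, at module load) two merged dispatch dicts keyed by the text before the first colon, so each call is a single partition plus one table lookup instead of A's staged pipeline of 24 startswith probes, a pseudo-namespace dict check and two literal-prefix checks.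
import Mathlib
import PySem

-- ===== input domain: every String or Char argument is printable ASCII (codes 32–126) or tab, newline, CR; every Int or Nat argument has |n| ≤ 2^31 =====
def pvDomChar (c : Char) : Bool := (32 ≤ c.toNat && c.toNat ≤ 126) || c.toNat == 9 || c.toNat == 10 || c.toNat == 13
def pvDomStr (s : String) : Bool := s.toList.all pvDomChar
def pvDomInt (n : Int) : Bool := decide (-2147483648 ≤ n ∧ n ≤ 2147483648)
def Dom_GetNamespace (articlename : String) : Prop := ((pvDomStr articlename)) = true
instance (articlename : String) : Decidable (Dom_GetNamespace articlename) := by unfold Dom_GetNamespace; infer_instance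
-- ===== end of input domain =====

-- B merges all the rules once (module load) into two dispatch tables keyed by the text before
-- the first ":", so a call is one partition plus one dict lookup instead of A's staged scans
-- (objective: alternative data structure; same cost class).

-- ===== PORT A =====
-- module constant `namespaces` (list of str, as lists of chars for exact kernel evaluation)
def pvNamespacesL : List (List Char) :=
  ["User".toList, "Wikipedia".toList, "WP".toList, "File".toList, "MediaWiki".toList,
   "Template".toList, "Help".toList, "Category".toList, "Portal".toList, "Draft".toList,
   "TimedText".toList, "Module".toList]

-- module constant `pseudoNamespaces` (dict str -> str)
def pvPseudoL : PySem.Dict (List Char) (List Char) :=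
  PySem.Dict.mk
    [("CAT".toList, "Category".toList), ("H".toList, "Help".toList),
     ("MOS".toList, "Wikipedia".toList), ("WP".toList, "Wikipedia".toList),
     ("WT".toList, "Wikipedia talk".toList), ("Project".toList, "Wikipedia".toList),
     ("Project_talk".toList, "Wikipedia talk".toList), ("Image".toList, "File".toList),
     ("Image_talk".toList, "File talk".toList), ("WikiProject".toList, "Wikipedia".toList),
     ("T".toList, "Template".toList), ("MP".toList, "Article".toList),
     ("P".toList, "Portal".toList), ("MoS".toList, "Wikipedia".toList)]

-- A's for-loop with early return
def pvNsLoop (cs : List Char) : List (List Char) → Option (List Char)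
  | [] => none
  | ns :: rest =>
      if PySem.Chars.startswith cs (ns ++ [':']) then some ns
      else if PySem.Chars.startswith cs (ns ++ "_talk:".toList) then some (ns ++ " talk".toList)
      else pvNsLoop cs rest

def GetNamespace (articlename : String) : String :=
  let cs := articlename.toList
  match pvNsLoop cs pvNamespacesL with
  | some r => String.ofList r
  | none =>
    -- prefix = articlename.split(":")[0]  (split never empty, so [0] is total)
    let pfx := PySem.List.pyGetD (PySem.Chars.splitOn cs [':']) 0 []
    match pvPseudoL.get? pfx with   -- `prefix in pseudoNamespaces` + `pseudoNamespaces[prefix]`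
    | some v => String.ofList v
    | none =>
      if PySem.Chars.startswith cs "Talk:".toList then "Talk"
      else if PySem.Chars.startswith cs "Special:".toList then "Special"
      else "Article"

-- ===== PORT B =====
-- _build_tables(): the colon table, built exactly as Source B builds it (inserts, then setdefaults)
def pvColonTable : PySem.Dict (List Char) (List Char) :=
  let d := pvNamespacesL.foldl
    (fun d ns => (d.insert ns ns).insert (ns ++ "_talk".toList) (ns ++ " talk".toList))
    PySem.Dict.empty
  let d := pvPseudoL.items.foldl (fun d kv => d.setdefault kv.1 kv.2) d
  let d := d.setdefault "Talk".toList "Talk".toList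
  d.setdefault "Special".toList "Special".toList

-- nocolon = dict(pseudoNamespaces)  (a copy with the same items)
def pvNoColonTable : PySem.Dict (List Char) (List Char) := PySem.Dict.mk pvPseudoL.items

def GetNamespace_alt (articlename : String) : String :=
  let cs := articlename.toList
  -- str.partition(":") ported by hand, exact: prefix = chars before the first ':',
  -- sep is truthy exactly when a ':' occurs in the string
  let pfx := cs.takeWhile (fun c => !(c == ':'))
  let sep := PySem.Chars.isIn [':'] cs
  let table := if sep then pvColonTable else pvNoColonTable
  String.ofList ((table.get? pfx).getD "Article".toList)

-- ===== PRECONDITION & SPEC =====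
def Spec_GetNamespace (articlename : String) (out : String) : Prop := out = GetNamespace_alt articlename
instance (articlename : String) (out : String) : Decidable (Spec_GetNamespace articlename out) := by unfold Spec_GetNamespace; infer_instance

-- ===== CLAIM (what is proved, stated in full; the proofs are below) =====
def Claim_equal_GetNamespace : Prop := ∀ (articlename : String), Dom_GetNamespace articlename → Spec_GetNamespace articlename (GetNamespace articlename)

-- ===== LEMMAS AND PROOFS =====

-- splitOn.go: the accumulator factors out
theorem pv_go_acc (fuel : Nat) (l cur : List Char) (acc : List (List Char)) :
    PySem.Chars.splitOn.go [':'] fuel l cur acc =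
      acc.reverse ++ PySem.Chars.splitOn.go [':'] fuel l cur [] := by
  induction fuel generalizing l cur acc with
  | zero => simp [PySem.Chars.splitOn.go]
  | succ n ih =>
    cases l with
    | nil => simp [PySem.Chars.splitOn.go]
    | cons c rest =>
      simp only [PySem.Chars.splitOn.go]
      split
      · rw [ih _ _ (cur.reverse :: acc), ih _ _ [cur.reverse]]
        simp
      · exact ih rest (c :: cur) acc

-- splitOn.go: the first piece is everything up to the first ':'
theorem pv_go_head (fuel : Nat) (l cur : List Char) (h : l.length < fuel) :
    ∃ tl, PySem.Chars.splitOn.go [':'] fuel l cur [] =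
      (cur.reverse ++ l.takeWhile (fun c => !(c == ':'))) :: tl := by
  induction fuel generalizing l cur with
  | zero => omega
  | succ n ih =>
    cases l with
    | nil => exact ⟨[], by simp [PySem.Chars.splitOn.go]⟩
    | cons c rest =>
      simp only [PySem.Chars.splitOn.go]
      by_cases hc : c = ':'
      · subst hc
        rw [if_pos (by simp [List.isPrefixOf])]
        rw [pv_go_acc]
        refine ⟨PySem.Chars.splitOn.go [':'] n rest [] [], ?_⟩
        simp
      · rw [if_neg (by simp [List.isPrefixOf]; exact fun h => (hc h.symm).elim)]
        obtain ⟨tl, htl⟩ := ih rest (c :: cur) (by simpa using Nat.lt_of_succ_lt_succ h)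
        exact ⟨tl, by simp [htl, hc]⟩

theorem pv_split_head (cs : List Char) :
    PySem.List.pyGetD (PySem.Chars.splitOn cs [':']) 0 [] = cs.takeWhile (fun c => !(c == ':')) := by
  obtain ⟨tl, htl⟩ := pv_go_head (cs.length + 1) cs [] (by omega)
  simp [PySem.Chars.splitOn, htl, PySem.List.pyGetD, PySem.List.pyGet?, PySem.List.pyIdx?]

-- startswith on a string whose first ':' sits right after q, probing p ++ ":"
theorem pv_sw_eq (p q r : List Char) (hp : (':' : Char) ∉ p) (hq : (':' : Char) ∉ q) :
    PySem.Chars.startswith (q ++ ':' :: r) (p ++ [':']) = (p == q) := by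
  by_cases h : p = q
  · subst h
    simp [PySem.Chars.startswith, List.isPrefixOf_iff_prefix]
  · rw [beq_false_of_ne h, PySem.Chars.startswith]
    simp only [List.isPrefixOf_iff_prefix, Bool.eq_false_iff, ne_eq]
    intro hpre
    apply h
    clear h
    induction p generalizing q with
    | nil =>
      cases q with
      | nil => rfl
      | cons d q' =>
        obtain ⟨t, ht⟩ := hpre
        simp only [List.cons_append, List.nil_append] at ht
        injection ht with h1 _
        exact absurd (by rw [← h1]; exact List.mem_cons_self : (':' : Char) ∈ d :: q') hq
    | cons a p' ihp =>
      cases q with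
      | nil =>
        simp only [List.cons_append, List.nil_append, List.cons_prefix_cons] at hpre
        exact absurd (by rw [← hpre.1]; exact List.mem_cons_self : (':' : Char) ∈ a :: p') hp
      | cons d q' =>
        simp only [List.cons_append, List.cons_prefix_cons] at hpre
        have := ihp q' (fun hm => hp (List.mem_cons_of_mem _ hm))
          (fun hm => hq (List.mem_cons_of_mem _ hm)) hpre.2
        rw [hpre.1, this]

-- a probe containing ':' never matches a colon-free string
theorem pv_sw_false (p cs : List Char) (hm : (':' : Char) ∈ p) (hq : (':' : Char) ∉ cs) :
    PySem.Chars.startswith cs p = false := by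
  rw [PySem.Chars.startswith]
  simp only [List.isPrefixOf_iff_prefix, Bool.eq_false_iff, ne_eq]
  exact fun hpre => hq (hpre.subset hm)

-- the shadow of A's loop once the string is split at its first colon
def pvPick (q : List Char) : List (List Char) → Option (List Char)
  | [] => none
  | ns :: rest =>
      if q = ns then some ns
      else if q = ns ++ "_talk".toList then some (ns ++ " talk".toList)
      else pvPick q rest

theorem pv_loop_colon (l : List (List Char)) (hl : ∀ ns ∈ l, (':' : Char) ∉ ns)
    (q r : List Char) (hq : (':' : Char) ∉ q) :
    pvNsLoop (q ++ ':' :: r) l = pvPick q l := by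
  induction l with
  | nil => rfl
  | cons ns rest ih =>
    have hns : (':' : Char) ∉ ns := hl ns List.mem_cons_self
    have hns' : (':' : Char) ∉ ns ++ "_talk".toList := by
      simp only [List.mem_append]
      rintro (h | h)
      · exact hns h
      · revert h; decide
    have e0 : "_talk:".toList = "_talk".toList ++ [':'] := by decide
    have e2 : ns ++ "_talk:".toList = (ns ++ "_talk".toList) ++ [':'] := by
      rw [e0, List.append_assoc]
    rw [pvNsLoop, pvPick, pv_sw_eq ns q r hns hq, e2,
        pv_sw_eq (ns ++ "_talk".toList) q r hns' hq,
        ih (fun x hx => hl x (List.mem_cons_of_mem _ hx))]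
    rcases eq_or_ne q ns with rfl | h
    · rw [if_pos (by simp), if_pos rfl]
    · rw [if_neg (by simpa using Ne.symm h), if_neg h]
      rcases eq_or_ne q (ns ++ "_talk".toList) with rfl | h2
      · rw [if_pos (by simp), if_pos rfl]
      · rw [if_neg (by simpa using Ne.symm h2), if_neg h2]

theorem pv_loop_nocolon (cs : List Char) (h : (':' : Char) ∉ cs) (l : List (List Char)) :
    pvNsLoop cs l = none := by
  induction l with
  | nil => rfl
  | cons ns rest ih =>
    rw [pvNsLoop,
        pv_sw_false (ns ++ [':']) cs (by simp) h,
        pv_sw_false (ns ++ "_talk:".toList) cs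
          (by rw [show "_talk:".toList = "_talk".toList ++ [':'] by decide]
              simp) h]
    simpa using ih

theorem pv_pick_none (q : List Char) (l : List (List Char)) (h1 : q ∉ l)
    (h2 : ∀ ns ∈ l, q ≠ ns ++ "_talk".toList) : pvPick q l = none := by
  induction l with
  | nil => rfl
  | cons ns rest ih =>
    rw [pvPick, if_neg (fun he => h1 (by rw [he]; exact List.mem_cons_self)),
        if_neg (h2 ns List.mem_cons_self),
        ih (fun hm => h1 (List.mem_cons_of_mem _ hm))
           (fun x hx => h2 x (List.mem_cons_of_mem _ hx))]

theorem pv_isIn_colon (cs : List Char) :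
    PySem.Chars.isIn [':'] cs = true ↔ (':' : Char) ∈ cs := by
  rw [PySem.Chars.isIn_iff_infix]
  constructor
  · intro h; exact h.subset List.mem_cons_self
  · intro h
    obtain ⟨s, t, rfl⟩ := List.append_of_mem h
    exact ⟨s, t, by simp⟩

-- every string the decision can single out (the colon table's keys)
def pvAllKeys : List (List Char) :=
  ["User".toList, "User_talk".toList, "Wikipedia".toList, "Wikipedia_talk".toList,
   "WP".toList, "WP_talk".toList, "File".toList, "File_talk".toList,
   "MediaWiki".toList, "MediaWiki_talk".toList, "Template".toList, "Template_talk".toList,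
   "Help".toList, "Help_talk".toList, "Category".toList, "Category_talk".toList,
   "Portal".toList, "Portal_talk".toList, "Draft".toList, "Draft_talk".toList,
   "TimedText".toList, "TimedText_talk".toList, "Module".toList, "Module_talk".toList,
   "CAT".toList, "H".toList, "MOS".toList, "WT".toList, "Project".toList,
   "Project_talk".toList, "Image".toList, "Image_talk".toList, "WikiProject".toList,
   "T".toList, "MP".toList, "P".toList, "MoS".toList, "Talk".toList, "Special".toList]

-- the colon table's lookup agrees with A's staged decision on the prefix
set_option maxRecDepth 16384 in
theorem pv_tbl_get (q : List Char) :
    pvColonTable.get? q =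
      (match pvPick q pvNamespacesL with
       | some r => some r
       | none =>
         match pvPseudoL.get? q with
         | some v => some v
         | none =>
           if "Talk".toList == q then some "Talk".toList
           else if "Special".toList == q then some "Special".toList
           else none) := by
  by_cases hq : q ∈ pvAllKeys
  · fin_cases hq <;> decide
  · have hns : ∀ x ∈ pvNamespacesL, x ∈ pvAllKeys := by decide
    have htalk : ∀ x ∈ pvNamespacesL, x ++ "_talk".toList ∈ pvAllKeys := by decide
    have hpse : ∀ x ∈ pvPseudoL.keys, x ∈ pvAllKeys := by decide
    have hcol : ∀ x ∈ pvColonTable.keys, x ∈ pvAllKeys := by decide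
    have h1 : pvPick q pvNamespacesL = none :=
      pv_pick_none q pvNamespacesL (fun hm => hq (hns q hm))
        (fun ns hnsm he => hq (he ▸ htalk ns hnsm))
    have h2 : pvPseudoL.get? q = none :=
      (PySem.Dict.get?_eq_none_iff_not_mem_keys pvPseudoL q).2 (fun hm => hq (hpse q hm))
    have h3 : pvColonTable.get? q = none :=
      (PySem.Dict.get?_eq_none_iff_not_mem_keys pvColonTable q).2 (fun hm => hq (hcol q hm))
    have hT : ("Talk".toList == q) = false :=
      beq_false_of_ne (fun he => hq (he ▸ (by decide : "Talk".toList ∈ pvAllKeys)))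
    have hS : ("Special".toList == q) = false :=
      beq_false_of_ne (fun he => hq (he ▸ (by decide : "Special".toList ∈ pvAllKeys)))
    rw [h1, h2, h3, hT, hS]
    simp

-- ===== VERDICT (by name: the statement is the Claim_ definition above) =====
theorem GetNamespace_spec : Claim_equal_GetNamespace := by
  intro a _
  unfold Spec_GetNamespace GetNamespace GetNamespace_alt
  simp only [pv_split_head]
  generalize a.toList = cs
  generalize hqd : cs.takeWhile (fun c => !(c == ':')) = q
  by_cases hc : (':' : Char) ∈ cs
  · -- a colon is present: cs = q ++ ':' :: rest with ':' ∉ q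
    have hq : (':' : Char) ∉ q := by
      intro hm
      rw [← hqd] at hm
      have := List.mem_takeWhile_imp hm
      simp at this
    obtain ⟨rest, hrest⟩ : ∃ rest, cs = q ++ ':' :: rest := by
      rcases hdw : cs.dropWhile (fun c => !(c == ':')) with _ | ⟨d, rest⟩
      · exfalso
        have h0 : q ++ cs.dropWhile (fun c => !(c == ':')) = cs := by
          rw [← hqd]; exact List.takeWhile_append_dropWhile
        rw [hdw, List.append_nil] at h0
        rw [← h0] at hc
        exact hq hc
      · have hd : d = ':' := by
          have := List.head_dropWhile_not (fun c => !(c == ':')) (l := cs) (by simp [hdw])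
          simp [hdw] at this
          exact this
        refine ⟨rest, ?_⟩
        conv_lhs => rw [← List.takeWhile_append_dropWhile (p := fun c => !(c == ':')) (l := cs)]
        rw [hqd, hdw, hd]
    subst hrest
    have hcolon : PySem.Chars.isIn [':'] (q ++ ':' :: rest) = true :=
      (pv_isIn_colon _).2 hc
    rw [pv_loop_colon pvNamespacesL (by decide) q rest hq, hcolon]
    have eT : ("Talk:".toList : List Char) = "Talk".toList ++ [':'] := by decide
    have eS : ("Special:".toList : List Char) = "Special".toList ++ [':'] := by decide
    rw [eT, pv_sw_eq "Talk".toList q rest (by decide) hq,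
        eS, pv_sw_eq "Special".toList q rest (by decide) hq,
        if_pos rfl, pv_tbl_get q]
    cases hp : pvPick q pvNamespacesL with
    | some r => rfl
    | none =>
      cases hps : pvPseudoL.get? q with
      | some v => rfl
      | none =>
        by_cases hT : "Talk".toList = q
        · rw [beq_iff_eq.mpr hT, if_pos rfl]; rfl
        · rw [beq_false_of_ne hT]
          by_cases hS : "Special".toList = q
          · rw [beq_iff_eq.mpr hS]; rfl
          · rw [beq_false_of_ne hS]; rfl
  · -- no colon anywhere
    have hqq : q = cs := by
      rw [← hqd]
      refine List.takeWhile_eq_self_iff.2 ?_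
      intro x hx
      simp only [Bool.not_eq_eq_eq_not, Bool.not_true, beq_eq_false_iff_ne, ne_eq]
      exact fun he => hc (he ▸ hx)
    subst hqq
    have hcolon : PySem.Chars.isIn [':'] q = false := by
      rw [Bool.eq_false_iff, ne_eq, pv_isIn_colon]
      exact hc
    rw [pv_loop_nocolon q hc, hcolon,
        pv_sw_false "Talk:".toList q (by decide) hc,
        pv_sw_false "Special:".toList q (by decide) hc]
    simp only [Bool.false_eq_true, if_false]
    have hcopy : pvNoColonTable = pvPseudoL := rfl
    rw [hcopy]
    cases pvPseudoL.get? q with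
    | some v => rfl
    | none => rfl
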